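-- pv_equiv track=rewrite | github.com/su-ram/Problem-Solving | elice/순열 구하기.py | getSub
-- ===== SOURCE A (Python) =====
-- def getSub(arr, r):
--
--     if r == 1:
--         return arr
--
--     result = []
--     for i in range(len(arr)):
--
--         prefix = arr[i]
--         next_sub = []
--
--         for j in range(len(arr)):
--             if j != i:
--                 next_sub.append(arr[j])
--
--         for s in getSub(next_sub, r - 1):
--
--             result.append(prefix + s)
--
--     return result
-- ===== SOURCE B (Python) =====
-- def getSub(arr, r):
--     if r == 1:
--         return arr
--     if r < 1:
--         return []
--     # iterative BFS: frontier of (accumulator, remaining elements) pairs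
--     frontier = [(arr[i], arr[:i] + arr[i + 1:]) for i in range(len(arr))]
--     steps = r - 1
--     while steps > 0 and frontier:
--         new = []
--         for acc, rest in frontier:
--             for k in range(len(rest)):
--                 new.append((acc + rest[k], rest[:k] + rest[k + 1:]))
--         frontier = new
--         steps -= 1
--     return [acc for acc, _ in frontier]
-- ===== Notes on version B (the rewrite author's own statement) =====
-- stated objective: alternative
-- what changed: Replaces A's recursion on r (rebuilding the remaining list with an index-filtering inner loop at every level) by an iterative breadth-first search that maintains a frontier of (accumulator, remaining-elements) pairs and expands it r-1 times.
import Mathlib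
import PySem

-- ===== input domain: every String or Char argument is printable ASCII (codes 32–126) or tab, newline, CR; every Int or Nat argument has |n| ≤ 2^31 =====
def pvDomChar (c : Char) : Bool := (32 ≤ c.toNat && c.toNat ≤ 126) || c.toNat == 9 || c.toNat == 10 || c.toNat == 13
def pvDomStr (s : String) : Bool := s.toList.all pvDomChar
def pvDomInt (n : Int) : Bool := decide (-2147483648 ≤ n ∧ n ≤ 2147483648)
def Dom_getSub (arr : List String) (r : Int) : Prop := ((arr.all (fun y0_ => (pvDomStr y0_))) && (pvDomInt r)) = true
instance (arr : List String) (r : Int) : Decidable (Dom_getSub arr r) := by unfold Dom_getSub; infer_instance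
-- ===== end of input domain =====

-- B rebuilds the permutations iteratively (breadth-first frontier of (accumulator, remaining) pairs)
-- instead of A's recursion on r; objective: alternative decomposition, same output order and values.

-- ===== PORT A =====
-- inner j-loop of A: next_sub = [arr[j] for j in range(len(arr)) if j != i]
def buildNext (arr : List String) (i : Nat) : List String :=
  (List.range arr.length).foldl (fun ns j => if j != i then ns ++ [arr.getD j ""] else ns) []

-- termination fact the port cites: removing index i shortens the list
theorem buildNext_length_lt (arr : List String) (i : Nat) (h : i < arr.length) :
    (buildNext arr i).length < arr.length := by
  unfold buildNext
  rw [PySem.List.foldl_append_if (fun j => j != i) (fun j => arr.getD j "") (List.range arr.length) []]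
  simp only [List.nil_append, List.length_map]
  calc (List.filter (fun j => j != i) (List.range arr.length)).length
      < (List.range arr.length).length := by
        apply List.length_filter_lt_length_iff_exists.mpr
        exact ⟨i, List.mem_range.mpr h, by simp⟩
    _ = arr.length := List.length_range ..

def getSub (arr : List String) (r : Int) : List String :=
  if r = 1 then arr
  else
    (List.range arr.length).attach.foldl
      (fun result i =>
        result ++ (getSub (buildNext arr i.1) (r - 1)).map (fun s => arr.getD i.1 "" ++ s))
      []
termination_by arr.length
decreasing_by exact buildNext_length_lt arr i.1 (List.mem_range.mp i.2)

-- ===== PORT B =====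
-- B's while loop: expand the frontier once per step, stopping early when it is empty
def loopB : Nat → List (String × List String) → List (String × List String)
  | 0, F => F
  | m + 1, F =>
    if F = [] then F
    else
      loopB m
        (F.foldl
          (fun new p =>
            (List.range p.2.length).foldl
              (fun new (k : Nat) =>
                new ++ [(p.1 ++ p.2.getD k "",
                  PySem.List.slice p.2 none (some (k : Int)) ++
                    PySem.List.slice p.2 (some ((k : Int) + 1)) none)])
              new)
          [])

def getSub_alt (arr : List String) (r : Int) : List String :=
  if r = 1 then arr
  else if r < 1 then []
  else
    let init := (List.range arr.length).map (fun i =>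
      (arr.getD i "",
        PySem.List.slice arr none (some (i : Int)) ++ PySem.List.slice arr (some ((i : Int) + 1)) none))
    (loopB (r - 1).toNat init).map (fun p => p.1)

-- ===== PRECONDITION & SPEC =====
def Spec_getSub (arr : List String) (r : Int) (out : List String) : Prop := out = getSub_alt arr r
instance (arr : List String) (r : Int) (out : List String) : Decidable (Spec_getSub arr r out) := by unfold Spec_getSub; infer_instance

-- ===== CLAIM (what is proved, stated in full; the proofs are below) =====
def Claim_equal_getSub : Prop := ∀ (arr : List String) (r : Int), Dom_getSub arr r → Spec_getSub arr r (getSub arr r)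

-- ===== LEMMAS AND PROOFS =====

-- removing index i, expressed with take/drop (what both ports' removal computes)
def rmv (xs : List String) (i : Nat) : List String := xs.take i ++ xs.drop (i + 1)

-- one BFS expansion of a (accumulator, remaining) pair, and one frontier step
def expandM (p : String × List String) : List (String × List String) :=
  (List.range p.2.length).map (fun k => (p.1 ++ p.2.getD k "", rmv p.2 k))

def stepF (F : List (String × List String)) : List (String × List String) := F.flatMap expandM

-- reference recursion: all m-length extension strings drawn from xs, in A's order
def Q : Nat → List String → List String
  | 0, _ => [""]
  | m + 1, xs =>
      (List.range xs.length).flatMap (fun i => (Q m (rmv xs i)).map (fun s => xs.getD i "" ++ s))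

theorem range_split (i m : Nat) :
    List.range (i + 1 + m) = List.range i ++ [i] ++ (List.range m).map (fun x => i + 1 + x) := by
  rw [List.range_add, List.range_succ]

theorem map_getD_range (xs : List String) (d : String) (n : Nat) (h : n ≤ xs.length) :
    (List.range n).map (fun i => xs.getD i d) = xs.take n := by
  apply List.ext_getElem
  · simp [Nat.min_eq_left h]
  · intro k h1 h2
    simp only [List.getElem_map, List.getElem_range, List.getElem_take]
    have hk : k < xs.length := by simp at h2; omega
    simp [List.getD_eq_getElem?_getD, hk]

theorem map_getD_range_shift (xs : List String) (d : String) (i : Nat) :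
    (List.range (xs.length - (i + 1))).map (fun x => xs.getD (i + 1 + x) d) = xs.drop (i + 1) := by
  apply List.ext_getElem
  · simp
  · intro k h1 h2
    simp only [List.getElem_map, List.getElem_range, List.getElem_drop]
    have hk : i + 1 + k < xs.length := by simp at h2; omega
    simp [List.getD_eq_getElem?_getD, hk]

theorem buildNext_eq (arr : List String) (i : Nat) (h : i < arr.length) :
    buildNext arr i = rmv arr i := by
  unfold buildNext rmv
  rw [PySem.List.foldl_append_if (fun j => j != i) (fun j => arr.getD j "") (List.range arr.length) []]
  have hsplit := range_split i (arr.length - (i + 1))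
  rw [show arr.length = i + 1 + (arr.length - (i + 1)) by omega, hsplit]
  rw [List.filter_append, List.filter_append]
  rw [List.filter_eq_self.mpr (by intro j hj; simp [Nat.ne_of_lt (List.mem_range.mp hj)])]
  rw [show List.filter (fun j => j != i) [i] = [] by simp]
  rw [List.filter_eq_self.mpr (by intro j hj; simp at hj; obtain ⟨x, _, rfl⟩ := hj; simp; omega)]
  rw [List.append_nil, List.map_append, List.map_map]
  rw [map_getD_range arr "" i (by omega)]
  simp only [Function.comp_def]
  rw [map_getD_range_shift arr "" i, List.nil_append]

theorem flatMap_attach {α β : Type} (l : List α) (f : α → List β) :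
    l.attach.flatMap (fun x => f x.1) = l.flatMap f := by
  conv_rhs => rw [← List.attach_map_subtype_val l]
  rw [List.flatMap_map]

-- A returns [] whenever r < 1 (recursion bottoms out on the empty list)
theorem getSub_lt_one : ∀ (n : Nat) (arr : List String) (r : Int),
    arr.length ≤ n → r < 1 → getSub arr r = [] := by
  intro n
  induction n with
  | zero =>
    intro arr r hlen hr
    have : arr = [] := List.eq_nil_of_length_eq_zero (by omega)
    subst this
    rw [getSub]
    simp [show ¬ r = 1 by omega]
  | succ n ih =>
    intro arr r hlen hr
    rw [getSub]
    rw [if_neg (by omega)]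
    rw [PySem.List.foldl_append_eq_flatMap]
    rw [List.nil_append, List.flatMap_eq_nil_iff.mpr]
    intro x hx
    have hi : x.1 < arr.length := List.mem_range.mp x.2
    rw [ih (buildNext arr x.1) (r - 1) (by have := buildNext_length_lt arr x.1 hi; omega) (by omega)]
    simp

-- A computes Q: getSub arr (n+1) = Q (n+1) arr
theorem getSub_eq_Q : ∀ (n : Nat) (arr : List String), getSub arr ((n : Int) + 1) = Q (n + 1) arr := by
  intro n
  induction n with
  | zero =>
    intro arr
    rw [getSub]
    simp only [Nat.cast_zero, zero_add, if_true, Q, List.map_cons, List.map_nil,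
      String.append_empty]
    rw [← List.map_eq_flatMap, map_getD_range arr "" arr.length le_rfl, List.take_length]
  | succ n ih =>
    intro arr
    rw [getSub]
    rw [if_neg (by push_cast; omega)]
    rw [PySem.List.foldl_append_eq_flatMap, List.nil_append]
    rw [show ((n + 1 : Nat) : Int) + 1 - 1 = (n : Int) + 1 by push_cast; ring]
    have h1 : (List.range arr.length).attach.flatMap
        (fun x => (getSub (buildNext arr x.1) ((n : Int) + 1)).map (fun s => arr.getD x.1 "" ++ s)) =
        (List.range arr.length).attach.flatMap
        (fun x => (Q (n + 1) (rmv arr x.1)).map (fun s => arr.getD x.1 "" ++ s)) :=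
      List.flatMap_congr fun x _ => by
        rw [buildNext_eq arr x.1 (List.mem_range.mp x.2), ih]
    rw [h1]
    exact (flatMap_attach (List.range arr.length)
      (fun i => (Q (n + 1) (rmv arr i)).map (fun s => arr.getD i "" ++ s))).trans (by simp [Q])

-- the BFS frontier after m steps, projected to accumulators, is Q m applied pairwise
theorem key_iter : ∀ (m : Nat) (F : List (String × List String)),
    (stepF^[m] F).map (fun p => p.1) = F.flatMap (fun p => (Q m p.2).map (fun s => p.1 ++ s)) := by
  intro m
  induction m with
  | zero =>
    intro F
    simp only [Q, List.map_cons, List.map_nil, String.append_empty]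
    exact List.map_eq_flatMap
  | succ m ih =>
    intro F
    rw [Function.iterate_succ_apply, ih (stepF F)]
    show (F.flatMap expandM).flatMap _ = _
    rw [List.flatMap_assoc]
    apply List.flatMap_congr
    intro p _
    unfold expandM
    rw [List.flatMap_map]
    simp only [Q, List.map_flatMap, List.map_map]
    apply List.flatMap_congr
    intro i _
    apply List.map_congr_left
    intro s _
    simp [String.append_assoc]

-- the literal inner loop of port B is one stepF
theorem body_eq (F : List (String × List String)) :
    F.foldl
      (fun new p =>
        (List.range p.2.length).foldl
          (fun new (k : Nat) =>
            new ++ [(p.1 ++ p.2.getD k "",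
              PySem.List.slice p.2 none (some (k : Int)) ++
                PySem.List.slice p.2 (some ((k : Int) + 1)) none)])
          new)
      [] = stepF F := by
  have hinner : ∀ (new : List (String × List String)) (p : String × List String),
      (List.range p.2.length).foldl
        (fun new (k : Nat) =>
          new ++ [(p.1 ++ p.2.getD k "",
            PySem.List.slice p.2 none (some (k : Int)) ++
              PySem.List.slice p.2 (some ((k : Int) + 1)) none)])
        new = new ++ expandM p := by
    intro new p
    rw [PySem.List.foldl_append_singleton_eq_map]
    unfold expandM rmv
    congr 1
    apply List.map_congr_left
    intro k _
    rw [PySem.List.slice_to_natCast,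
      show ((k : Int) + 1) = ((k + 1 : Nat) : Int) by push_cast; ring,
      PySem.List.slice_from_natCast]
  rw [show (fun (new : List (String × List String)) (p : String × List String) =>
      (List.range p.2.length).foldl
        (fun new (k : Nat) =>
          new ++ [(p.1 ++ p.2.getD k "",
            PySem.List.slice p.2 none (some (k : Int)) ++
              PySem.List.slice p.2 (some ((k : Int) + 1)) none)])
        new) = (fun new p => new ++ expandM p) from funext fun new => funext fun p => hinner new p]
  rw [PySem.List.foldl_append_eq_flatMap, List.nil_append]
  rfl

-- once the frontier is empty it stays empty
theorem iterate_stepF_nil : ∀ m : Nat, stepF^[m] [] = [] := by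
  intro m
  induction m with
  | zero => rfl
  | succ m ih => rw [Function.iterate_succ_apply]; exact ih

-- B's while loop iterates stepF (the early exit is invisible in the value)
theorem loopB_eq : ∀ (m : Nat) (F : List (String × List String)),
    loopB m F = stepF^[m] F := by
  intro m
  induction m with
  | zero => intro F; rfl
  | succ m ih =>
    intro F
    rw [loopB]
    by_cases hF : F = []
    · subst hF
      rw [if_pos rfl, Function.iterate_succ_apply]
      show ([] : List (String × List String)) = stepF^[m] (stepF [])
      rw [show stepF ([] : List (String × List String)) = [] from rfl, iterate_stepF_nil m]
    · rw [if_neg hF, body_eq F, ih, Function.iterate_succ_apply]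

-- ===== VERDICT (by name: the statement is the Claim_ definition above) =====
theorem getSub_spec : Claim_equal_getSub := by
  intro arr r _
  unfold Spec_getSub getSub_alt
  by_cases h1 : r = 1
  · subst h1
    rw [getSub]
    simp
  · rw [if_neg h1]
    by_cases h2 : r < 1
    · rw [if_pos h2]
      exact getSub_lt_one arr.length arr r le_rfl h2
    · rw [if_neg h2]
      have hr : 2 ≤ r := by omega
      simp only []
      -- rewrite init to (range len).map (fun i => (arr.getD i "", rmv arr i))
      rw [show (fun i => (arr.getD i "",
            PySem.List.slice arr none (some (i : Int)) ++
              PySem.List.slice arr (some ((i : Int) + 1)) none)) =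
          (fun (i : Nat) => (arr.getD i "", rmv arr i)) from funext fun i => by
            unfold rmv
            rw [PySem.List.slice_to_natCast,
              show ((i : Int) + 1) = ((i + 1 : Nat) : Int) by push_cast; ring,
              PySem.List.slice_from_natCast]]
      rw [loopB_eq, key_iter, List.flatMap_map]
      rw [show r = (((r - 1).toNat : Nat) : Int) + 1 by omega]
      rw [getSub_eq_Q]
      simp [Q]
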